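-- pv_equiv track=rewrite | github.com/kinoshitayoshihiro/composer4 | scripts/predict_phrase.py | split_songs
-- ===== SOURCE A (Python) =====
-- def split_songs(rows: list[dict[str, str]]) -> list[list[dict[str, str]]]:
--     # Heuristic: new song when bar value drops (reset)
--     songs: list[list[dict[str, str]]] = []
--     cur: list[dict[str, str]] = []
--     prev_bar: int | None = None
--     for r in rows:
--         try:
--             bar = int(r.get("bar", 0))
--         except Exception:
--             bar = 0
--         if prev_bar is None or bar >= prev_bar:
--             cur.append(r)
--         else:
--             if cur:
--                 songs.append(cur)
--             cur = [r]
--         prev_bar = bar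
--     if cur:
--         songs.append(cur)
--     return songs
-- ===== SOURCE B (Python) =====
-- def split_songs(rows: list[dict[str, str]]) -> list[list[dict[str, str]]]:
--     # Backward pass: walk rows in reverse, opening a new group whenever the
--     # row after the current one has a smaller bar; groups are built reversed
--     # (cheap appends) and un-reversed once at the end.
--     def _bar(r):
--         try:
--             return int(r.get("bar", 0))
--         except Exception:
--             return 0
--     out_rev: list = []  # groups in reverse order; each group's rows reversed
--     for r in reversed(rows):
--         if out_rev and _bar(out_rev[-1][-1]) < _bar(r):
--             out_rev.append([r])
--         elif out_rev:
--             out_rev[-1].append(r)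
--         else:
--             out_rev = [[r]]
--     return [g[::-1] for g in reversed(out_rev)]
-- ===== Notes on version B (the rewrite author's own statement) =====
-- stated objective: alternative
-- what changed: Replaces A's forward scan carrying (songs, cur, prev_bar) state with a backward pass that compares each row's bar against the row just after it (the last row of the last reverse-built group) and un-reverses the groups once at the end.
import Mathlib
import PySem

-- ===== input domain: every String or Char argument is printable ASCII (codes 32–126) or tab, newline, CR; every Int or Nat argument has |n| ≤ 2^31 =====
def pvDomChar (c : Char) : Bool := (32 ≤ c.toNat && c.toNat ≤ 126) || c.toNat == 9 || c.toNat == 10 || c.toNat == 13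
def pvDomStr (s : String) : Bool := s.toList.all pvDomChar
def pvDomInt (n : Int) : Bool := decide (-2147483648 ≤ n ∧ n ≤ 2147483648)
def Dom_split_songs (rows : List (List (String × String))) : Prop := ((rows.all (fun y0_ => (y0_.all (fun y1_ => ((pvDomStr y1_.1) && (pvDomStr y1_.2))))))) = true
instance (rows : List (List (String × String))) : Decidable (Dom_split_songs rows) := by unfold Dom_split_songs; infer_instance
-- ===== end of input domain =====

-- B re-implements the split as a backward pass (new group whenever the following
-- row's bar is smaller), instead of A's forward scan with (songs, cur, prev_bar) state.

-- shared primitive: bar = int(r.get("bar", 0)) with try/except fallback to 0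
-- (r.get = first-match lookup on the association list; int(s) = PySem.Int.ofStr?)
def barOf (r : List (String × String)) : Int :=
  match r.lookup "bar" with
  | none => 0
  | some s => (PySem.Int.ofStr? s).getD 0

-- ===== PORT A =====
-- one loop iteration of A over state (songs, cur, prev_bar)
def stepA (st : List (List (List (String × String))) × List (List (String × String)) × Option Int)
    (r : List (String × String)) :
    List (List (List (String × String))) × List (List (String × String)) × Option Int :=
  let bar := barOf r
  match st with
  | (songs, cur, prev) =>
    match prev with
    | none => (songs, cur ++ [r], some bar)
    | some p =>
      if p ≤ bar then (songs, cur ++ [r], some bar)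
      else ((if cur ≠ [] then songs ++ [cur] else songs), [r], some bar)

def split_songs (rows : List (List (String × String))) : List (List (List (String × String))) :=
  match rows.foldl stepA ([], [], none) with
  | (songs, cur, _) => if cur ≠ [] then songs ++ [cur] else songs

-- ===== PORT B =====
-- one iteration of B's reversed loop; acc holds the groups in reverse order,
-- each group's rows reversed.  The inner `g.getLast?.getD r` reads out_rev[-1][-1];
-- every group in acc is nonempty by construction, so the default is never used.
def stepB (acc : List (List (List (String × String)))) (r : List (String × String)) :
    List (List (List (String × String))) :=
  match acc.getLast? with
  | none => [[r]]
  | some g =>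
    if barOf (g.getLast?.getD r) < barOf r then acc ++ [[r]]
    else acc.dropLast ++ [g ++ [r]]

def split_songs_alt (rows : List (List (String × String))) : List (List (List (String × String))) :=
  let out_rev := rows.reverse.foldl stepB []
  out_rev.reverse.map List.reverse

-- ===== PRECONDITION & SPEC =====
def Spec_split_songs (rows : List (List (String × String))) (out : List (List (List (String × String)))) : Prop := out = split_songs_alt rows
instance (rows : List (List (String × String))) (out : List (List (List (String × String)))) : Decidable (Spec_split_songs rows out) := by unfold Spec_split_songs; infer_instance

-- ===== CLAIM (what is proved, stated in full; the proofs are below) =====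
def Claim_equal_split_songs : Prop := ∀ (rows : List (List (String × String))), Dom_split_songs rows → Spec_split_songs rows (split_songs rows)

-- ===== LEMMAS AND PROOFS =====

-- reference recursion: both ports are proved equal to this structural split
def splitRec : List (List (String × String)) → List (List (List (String × String)))
  | [] => []
  | [r] => [[r]]
  | r :: r' :: rest =>
    if barOf r' < barOf r then [r] :: splitRec (r' :: rest)
    else
      match splitRec (r' :: rest) with
      | [] => [[r]]          -- unreachable: splitRec of a nonempty list is nonempty
      | g :: gs => (r :: g) :: gs

theorem splitRec_cons_head (rest : List (List (String × String))) :
    ∀ r, ∃ t gs, splitRec (r :: rest) = (r :: t) :: gs := by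
  induction rest with
  | nil => intro r; exact ⟨[], [], rfl⟩
  | cons r' tl ih =>
    intro r
    obtain ⟨t, gs, h⟩ := ih r'
    by_cases hb : barOf r' < barOf r
    · exact ⟨[], splitRec (r' :: tl), by simp [splitRec, hb]⟩
    · exact ⟨r' :: t, gs, by simp [splitRec, hb, h]⟩

def glue (cur : List (List (String × String))) :
    List (List (List (String × String))) → List (List (List (String × String)))
  | [] => [cur]
  | g :: gs => (cur ++ g) :: gs

def finA (st : List (List (List (String × String))) × List (List (String × String)) × Option Int) :
    List (List (List (String × String))) :=
  if st.2.1 ≠ [] then st.1 ++ [st.2.1] else st.1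

theorem split_songs_eq_finA (rows : List (List (String × String))) :
    split_songs rows = finA (rows.foldl stepA ([], [], none)) := rfl

theorem runA_eq (rows : List (List (String × String))) :
    ∀ (songs : List (List (List (String × String)))) (cur : List (List (String × String))) r0,
      finA (rows.foldl stepA (songs, cur ++ [r0], some (barOf r0)))
      = songs ++ glue cur (splitRec (r0 :: rows)) := by
  induction rows with
  | nil => intro songs cur r0; simp [finA, splitRec, glue]
  | cons r rest ih =>
    intro songs cur r0
    obtain ⟨t, gs, hrec⟩ := splitRec_cons_head rest r
    by_cases hb : barOf r < barOf r0
    · -- drop: close current group, start [r]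
      have hs : stepA (songs, cur ++ [r0], some (barOf r0)) r
          = (songs ++ [cur ++ [r0]], [r], some (barOf r)) := by
        simp [stepA, not_le.mpr hb]
      have h1 := ih (songs ++ [cur ++ [r0]]) [] r
      rw [List.foldl_cons, hs,
        show ([r] : List (List (String × String))) = [] ++ [r] from rfl, h1]
      simp [splitRec, hb, hrec, glue]
    · -- continue current group
      have hs : stepA (songs, cur ++ [r0], some (barOf r0)) r
          = (songs, (cur ++ [r0]) ++ [r], some (barOf r)) := by
        simp [stepA, not_lt.mp hb]
      have h1 := ih songs (cur ++ [r0]) r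
      rw [List.foldl_cons, hs, h1]
      simp [splitRec, hb, hrec, glue]

theorem split_songs_eq_splitRec (rows : List (List (String × String))) :
    split_songs rows = splitRec rows := by
  cases rows with
  | nil => simp [split_songs, splitRec]
  | cons r rest =>
    have hs : stepA ([], [], none) r = ([], [] ++ [r], some (barOf r)) := by
      simp [stepA]
    obtain ⟨t, gs, hrec⟩ := splitRec_cons_head rest r
    rw [split_songs_eq_finA, List.foldl_cons, hs, runA_eq rest [] [] r]
    simp [glue, hrec]

-- acc representation: groups in reverse order, each group reversed
def rep (gs : List (List (List (String × String)))) : List (List (List (String × String))) :=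
  (gs.map List.reverse).reverse

theorem foldr_stepB_eq (rows : List (List (String × String))) :
    rows.foldr (fun r acc => stepB acc r) [] = rep (splitRec rows) := by
  induction rows with
  | nil => rfl
  | cons r rest ih =>
    cases rest with
    | nil => simp [stepB, splitRec, rep]
    | cons r' tl =>
      obtain ⟨t, gs, hrec⟩ := splitRec_cons_head tl r'
      simp only [List.foldr_cons, ih]
      by_cases hb : barOf r' < barOf r
      · simp [stepB, splitRec, hb, hrec, rep]
      · simp [stepB, splitRec, hb, hrec, rep]

theorem split_songs_alt_eq_splitRec (rows : List (List (String × String))) :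
    split_songs_alt rows = splitRec rows := by
  unfold split_songs_alt
  rw [List.foldl_reverse, foldr_stepB_eq]
  simp [rep, List.map_map]

-- ===== VERDICT (by name: the statement is the Claim_ definition above) =====
theorem split_songs_spec : Claim_equal_split_songs := by
  intro rows _
  unfold Spec_split_songs
  rw [split_songs_eq_splitRec, split_songs_alt_eq_splitRec]
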